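-- pv_equiv track=rewrite | github.com/Andrew5057/equation-solver | equation-solver.py | validate_equation
-- ===== SOURCE A (Python) =====
-- def validate_equation(equation_string):
--     '''Ensures the inputted equation follows the format guidlines'''
--
--     # Check for illegal characters
--     for char in equation_string:
--         if char.isalpha() or char.isnumeric() or char in ['+', '-', '*', '/', '.', '=']:
--             pass
--         else:
--             return False
--
--     # Make sure only 1 variable exists
--     equation_variable = ''
--     for char in equation_string:
--         if char.isalpha():
--             if equation_variable == '' or equation_variable == char:
--                 equation_variable = char
--             else:
--                 return False
--
--     # Make sure there is exactly 1 equals sign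
--     if not equation_string.count('=') == 1:
--         return False
--
--     return True
-- ===== SOURCE B (Python) =====
-- def validate_equation(equation_string):
--     '''Ensures the inputted equation follows the format guidlines'''
--     # Validity depends only on the multiset of characters, so build a
--     # frequency table once and validate the (distinct) keys and counts.
--     counts = {}
--     for char in equation_string:
--         counts[char] = counts.get(char, 0) + 1
--     if any(not (k.isalpha() or k.isnumeric() or k in ('+', '-', '*', '/', '.', '='))
--            for k in counts):
--         return False
--     if sum(1 for k in counts if k.isalpha()) > 1:
--         return False
--     return counts.get('=', 0) == 1
-- ===== Notes on version B (the rewrite author's own statement) =====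
-- stated objective: alternative
-- what changed: Exploits that validity depends only on the character multiset: B builds a frequency table (dict) of the string once and validates the distinct keys (legality, at most one alphabetic key) and the equals-sign count from the table, instead of A's three positional scans with an early-return single-variable accumulator.
import Mathlib
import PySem

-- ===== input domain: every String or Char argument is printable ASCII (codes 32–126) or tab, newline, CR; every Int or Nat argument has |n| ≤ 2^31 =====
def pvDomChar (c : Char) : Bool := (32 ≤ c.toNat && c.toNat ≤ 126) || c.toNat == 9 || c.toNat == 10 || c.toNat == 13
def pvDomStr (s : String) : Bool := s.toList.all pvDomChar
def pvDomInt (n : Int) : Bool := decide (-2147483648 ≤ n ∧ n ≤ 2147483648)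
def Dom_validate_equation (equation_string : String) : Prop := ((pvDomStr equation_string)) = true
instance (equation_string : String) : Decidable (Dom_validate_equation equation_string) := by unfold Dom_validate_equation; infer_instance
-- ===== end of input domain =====

-- B exploits that validity depends only on the character multiset: it builds a
-- frequency table of the string once and validates the distinct keys and the
-- count of '=' from the table, instead of A's three positional scans with an
-- early-return single-variable accumulator (objective: alternative).


-- ===== PORT A =====
-- on the ASCII domain Python's isnumeric coincides with isdigit (PySem.Chars.isdigit is exact there)
def vaLegalChar (c : Char) : Bool :=
  PySem.Chars.isalpha c || PySem.Chars.isdigit c || c ∈ ['+', '-', '*', '/', '.', '=']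

-- A's first loop: early-return False on an illegal character
def vaCheckChars : List Char → Bool
  | [] => true
  | c :: rest => if vaLegalChar c then vaCheckChars rest else false

-- A's second loop: the accumulator equation_variable (a string, '' initially), early-return False
def vaFindVar : List Char → String → Bool
  | [], _ => true
  | c :: rest, var =>
      if PySem.Chars.isalpha c then
        if var = "" || var = String.ofList [c] then vaFindVar rest (String.ofList [c]) else false
      else vaFindVar rest var

def validate_equation (equation_string : String) : Bool :=
  if !vaCheckChars equation_string.toList then false
  else if !vaFindVar equation_string.toList "" then false
  else if !(PySem.Str.count equation_string "=" == 1) then false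
  else true

-- ===== PORT B =====
def validate_equation_alt (equation_string : String) : Bool :=
  -- counts[char] = counts.get(char, 0) + 1 over the string
  let counts : PySem.Dict Char Int :=
    equation_string.toList.foldl (fun d c => d.insert c (d.getD c 0 + 1)) PySem.Dict.empty
  if counts.keys.any (fun k =>
      !(PySem.Chars.isalpha k || PySem.Chars.isdigit k || k ∈ ['+', '-', '*', '/', '.', '='])) then
    false
  else if ((counts.keys.filter (fun k => PySem.Chars.isalpha k)).map (fun _ => (1 : Int))).sum > 1 then
    false
  else counts.getD '=' 0 == 1

-- ===== PRECONDITION & SPEC =====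
def Spec_validate_equation (equation_string : String) (out : Bool) : Prop := out = validate_equation_alt equation_string
instance (equation_string : String) (out : Bool) : Decidable (Spec_validate_equation equation_string out) := by unfold Spec_validate_equation; infer_instance

-- ===== CLAIM (what is proved, stated in full; the proofs are below) =====
def Claim_equal_validate_equation : Prop := ∀ (equation_string : String), Dom_validate_equation equation_string → Spec_validate_equation equation_string (validate_equation equation_string)

-- ===== LEMMAS AND PROOFS =====

theorem vaCheckChars_eq_all (cs : List Char) : vaCheckChars cs = cs.all vaLegalChar := by
  induction cs with
  | nil => rfl
  | cons c rest ih =>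
      simp only [vaCheckChars, List.all_cons, ih]
      by_cases h : vaLegalChar c = true <;> simp [h]

theorem sstr_inj (v c : Char) : (String.ofList [v] = String.ofList [c]) = (v = c) := by
  simp only [eq_iff_iff]
  constructor
  · intro h
    have := congrArg String.toList h
    simpa using this
  · intro h; rw [h]

theorem vaFindVar_single (cs : List Char) (v : Char) :
    vaFindVar cs (String.ofList [v]) =
      (cs.filter (fun c => PySem.Chars.isalpha c)).all (fun c => c = v) := by
  induction cs generalizing v with
  | nil => rfl
  | cons c rest ih =>
      by_cases h : PySem.Chars.isalpha c = true
      · by_cases hv : c = v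
        · subst hv
          simp [vaFindVar, h, ih]
        · simp [vaFindVar, h, sstr_inj, Ne.symm hv, hv]
      · simp [vaFindVar, h, ih]

theorem vaFindVar_empty (cs : List Char) :
    vaFindVar cs "" =
      (match cs.filter (fun c => PySem.Chars.isalpha c) with
       | [] => true
       | v :: rest => rest.all (fun c => c = v)) := by
  induction cs with
  | nil => rfl
  | cons c rest ih =>
      by_cases h : PySem.Chars.isalpha c = true
      · have h1 : vaFindVar (c :: rest) "" = vaFindVar rest (String.ofList [c]) := by
          simp [vaFindVar, h]
        rw [h1, vaFindVar_single]
        simp [h]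
      · simp [vaFindVar, h, ih]

-- the single-variable loop succeeds iff all alphabetic characters are pairwise equal
theorem vaFindVar_iff (cs : List Char) :
    vaFindVar cs "" = true ↔
      ∀ a ∈ cs, PySem.Chars.isalpha a → ∀ b ∈ cs, PySem.Chars.isalpha b → a = b := by
  rw [vaFindVar_empty]
  have hmem : ∀ x, x ∈ cs.filter (fun c => PySem.Chars.isalpha c) ↔
      x ∈ cs ∧ PySem.Chars.isalpha x = true := by
    intro x; simp [List.mem_filter]
  match h : cs.filter (fun c => PySem.Chars.isalpha c) with
  | [] =>
      simp only [h] at hmem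
      constructor
      · intro _ a ha hpa
        exact absurd ((hmem a).2 ⟨ha, hpa⟩) (by simp)
      · intro _; rfl
  | v :: rest =>
      simp only [h] at hmem
      simp only [List.all_eq_true, decide_eq_true_eq]
      constructor
      · intro hall a ha hpa b hb hpb
        have key : ∀ x, x ∈ v :: rest → x = v := by
          intro x hx
          rcases List.mem_cons.1 hx with h1 | h1
          · exact h1
          · exact hall x h1
        rw [key a ((hmem a).2 ⟨ha, hpa⟩), key b ((hmem b).2 ⟨hb, hpb⟩)]
      · intro hall a ha
        have hv := (hmem v).1 (List.mem_cons_self ..)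
        have ha' := (hmem a).1 (List.mem_cons_of_mem _ ha)
        exact hall a ha'.1 ha'.2 v hv.1 hv.2

-- a nodup list with the same members as cs ∧ p: its length is ≤ 1 iff the p-elements
-- of cs are pairwise equal
theorem nodup_len_le_one (ks cs : List Char) (p : Char → Bool)
    (hnd : ks.Nodup) (hmem : ∀ x, x ∈ ks ↔ x ∈ cs ∧ p x = true) :
    (ks.length ≤ 1) ↔
      ∀ a ∈ cs, p a → ∀ b ∈ cs, p b → a = b := by
  constructor
  · intro hlen a ha hpa b hb hpb
    match hs : ks with
    | [] => exact absurd ((hmem a).2 ⟨ha, hpa⟩) (by simp)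
    | [x] =>
        have h1 : a = x := by have := (hmem a).2 ⟨ha, hpa⟩; simpa using this
        have h2 : b = x := by have := (hmem b).2 ⟨hb, hpb⟩; simpa using this
        rw [h1, h2]
    | x :: y :: t => simp at hlen
  · intro hall
    match hs : ks with
    | [] => simp
    | [x] => simp
    | x :: y :: t =>
        exfalso
        have hx := (hmem x).1 (by simp)
        have hy := (hmem y).1 (by simp)
        have : x = y := hall x hx.1 hx.2 y hy.1 hy.2
        simp [this] at hnd

theorem count_go_single (v : Char) : ∀ (fuel : Nat) (l : List Char) (acc : Nat), l.length ≤ fuel →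
    PySem.Chars.count.go [v] fuel l acc = acc + l.count v := by
  intro fuel
  induction fuel with
  | zero => intro l acc h; cases l <;> simp [PySem.Chars.count.go] at *
  | succ n ih =>
      intro l acc h
      cases l with
      | nil => simp [PySem.Chars.count.go]
      | cons c t =>
          by_cases hc : c = v
          · subst hc
            have hp : [c].isPrefixOf (c :: t) = true := by simp [List.isPrefixOf]
            simp [PySem.Chars.count.go, hp, ih t (acc + 1) (by simpa using h)]
            omega
          · have hp : [v].isPrefixOf (c :: t) = false := by
              simp [List.isPrefixOf, Ne.symm hc]
            simp [PySem.Chars.count.go, hp, ih t acc (by simpa using h), hc]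

theorem count_single (cs : List Char) (v : Char) :
    PySem.Chars.count cs [v] = cs.count v := by
  simp [PySem.Chars.count, count_go_single v cs.length cs 0 le_rfl]

-- ===== VERDICT (by name: the statement is the Claim_ definition above) =====
theorem validate_equation_spec : Claim_equal_validate_equation := by
  intro s _
  show validate_equation s = validate_equation_alt s
  -- name the pieces
  set cs := s.toList with hcs
  have hcounter :
      cs.foldl (fun d c => d.insert c (d.getD c 0 + 1)) PySem.Dict.empty = PySem.Dict.counter cs :=
    PySem.Dict.foldl_insert_getD_add_one_eq_counter cs
  have hkeys : (PySem.Dict.counter cs).keys = PySem.Set.ofList cs := PySem.Dict.keys_counter cs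
  have hknd : (PySem.Set.ofList cs).Nodup := PySem.Set.nodup_ofList cs
  have hkmem : ∀ x, x ∈ PySem.Set.ofList cs ↔ x ∈ cs := fun x => PySem.Set.mem_ofList cs x
  -- the illegal-character checks agree
  have hlegal : ((PySem.Set.ofList cs).any (fun k =>
      !(PySem.Chars.isalpha k || PySem.Chars.isdigit k || k ∈ ['+', '-', '*', '/', '.', '=']))) =
      !cs.all vaLegalChar := by
    cases hall : cs.all vaLegalChar
    · rw [List.all_eq_false] at hall
      obtain ⟨x, hx, hpx⟩ := hall
      have : (PySem.Set.ofList cs).any (fun k => !vaLegalChar k) = true := by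
        simp only [List.any_eq_true]
        exact ⟨x, (hkmem x).2 hx, by simp [hpx]⟩
      simpa [vaLegalChar] using this
    · simp only [List.all_eq_true] at hall
      have : (PySem.Set.ofList cs).any (fun k => !vaLegalChar k) = false := by
        simp only [List.any_eq_false]
        intro x hx
        simp [hall x ((hkmem x).1 hx)]
      simpa [vaLegalChar] using this
  -- the single-variable checks agree
  have hfilter_nd : ((PySem.Set.ofList cs).filter (fun k => PySem.Chars.isalpha k)).Nodup :=
    hknd.filter _
  have hfilter_mem : ∀ x, x ∈ (PySem.Set.ofList cs).filter (fun k => PySem.Chars.isalpha k) ↔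
      x ∈ cs ∧ PySem.Chars.isalpha x = true := by
    intro x; rw [List.mem_filter]; rw [hkmem x]
  have hvar : vaFindVar cs "" =
      decide (((PySem.Set.ofList cs).filter (fun k => PySem.Chars.isalpha k)).length ≤ 1) := by
    by_cases hp : ((PySem.Set.ofList cs).filter (fun k => PySem.Chars.isalpha k)).length ≤ 1
    · have := (nodup_len_le_one _ cs _ hfilter_nd hfilter_mem).1 hp
      rw [(vaFindVar_iff cs).2 this]; simp [hp]
    · have hne : vaFindVar cs "" ≠ true := fun h =>
        hp ((nodup_len_le_one _ cs _ hfilter_nd hfilter_mem).2 ((vaFindVar_iff cs).1 h))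
      simp [Bool.eq_false_iff.2 hne, hp]
  -- the sum of 1's is the length
  have hsum : (((PySem.Set.ofList cs).filter (fun k => PySem.Chars.isalpha k)).map
      (fun _ => (1 : Int))).sum =
      (((PySem.Set.ofList cs).filter (fun k => PySem.Chars.isalpha k)).length : Int) := by
    rw [List.map_const']
    simp [List.sum_replicate, mul_comm]
  -- the equals-sign checks agree
  have heq : PySem.Str.count s "=" = cs.count '=' := by
    show PySem.Chars.count s.toList ('=' :: "".toList) = cs.count '='
    rw [← hcs]
    exact count_single cs '='
  have hgetD : (PySem.Dict.counter cs).getD '=' 0 = (cs.count '=' : Int) :=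
    PySem.Dict.getD_counter cs '='
  -- put the pieces together
  unfold validate_equation validate_equation_alt
  rw [← hcs]
  simp only [hcounter, hkeys, hlegal, vaCheckChars_eq_all, hsum, hgetD, heq]
  cases hall : cs.all vaLegalChar
  · simp
  · simp only [Bool.not_true, Bool.false_eq_true, if_false]
    rw [hvar]
    by_cases hp : ((PySem.Set.ofList cs).filter (fun k => PySem.Chars.isalpha k)).length ≤ 1
    · have : ¬ ((((PySem.Set.ofList cs).filter (fun k => PySem.Chars.isalpha k)).length : Int) > 1) := by
        exact_mod_cast not_lt.2 hp
      simp only [hp, decide_true, Bool.not_true, Bool.false_eq_true, if_false, this]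
      cases h1 : (cs.count '=' == 1)
      · have h2 : ((cs.count '=' : Int) == 1) = false := by
          simp only [beq_eq_false_iff_ne, ne_eq] at h1 ⊢
          exact_mod_cast h1
        simp [h2]
      · have h2 : ((cs.count '=' : Int) == 1) = true := by
          simp only [beq_iff_eq] at h1 ⊢
          exact_mod_cast h1
        simp [h2]
    · have : ((((PySem.Set.ofList cs).filter (fun k => PySem.Chars.isalpha k)).length : Int) > 1) := by
        exact_mod_cast not_le.1 hp
      simp [hp, this]
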